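-- pv_equiv track=rewrite | github.com/tuantnguyen95/POC-GA | src/service/xml_utils.py | get_scrollable_element_xpath
-- ===== SOURCE A (Python) =====
-- def get_scrollable_element_xpath(xpath, scrollable_classes):
--   parents = xpath.split('/')[:-1]
--
--   for name in scrollable_classes:
--     for i in reversed(range(len(parents))):
--       item = parents[i]
--       if name in item:
--         return '/'.join(parents[:i+1])
--   return None
-- ===== SOURCE B (Python) =====
-- def get_scrollable_element_xpath(xpath, scrollable_classes):
--   parents = xpath.split('/')[:-1]
--
--   # one forward pass: deepest index per class name (later i overwrites)
--   deepest = {}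
--   for i, item in enumerate(parents):
--     for name in scrollable_classes:
--       if name in item:
--         deepest[name] = i
--
--   # priority pass in the classes' original order
--   for name in scrollable_classes:
--     if name in deepest:
--       return '/'.join(parents[:deepest[name] + 1])
--   return None
-- ===== Notes on version B (the rewrite author's own statement) =====
-- stated objective: faster
-- what changed: Instead of re-scanning the parents list deepest-first for each class, B makes one forward pass over parents with enumerate building a dict of the deepest matching index per class name, then a separate priority pass over scrollable_classes returns the joined prefix for the first class present in the dict.
import Mathlib
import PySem

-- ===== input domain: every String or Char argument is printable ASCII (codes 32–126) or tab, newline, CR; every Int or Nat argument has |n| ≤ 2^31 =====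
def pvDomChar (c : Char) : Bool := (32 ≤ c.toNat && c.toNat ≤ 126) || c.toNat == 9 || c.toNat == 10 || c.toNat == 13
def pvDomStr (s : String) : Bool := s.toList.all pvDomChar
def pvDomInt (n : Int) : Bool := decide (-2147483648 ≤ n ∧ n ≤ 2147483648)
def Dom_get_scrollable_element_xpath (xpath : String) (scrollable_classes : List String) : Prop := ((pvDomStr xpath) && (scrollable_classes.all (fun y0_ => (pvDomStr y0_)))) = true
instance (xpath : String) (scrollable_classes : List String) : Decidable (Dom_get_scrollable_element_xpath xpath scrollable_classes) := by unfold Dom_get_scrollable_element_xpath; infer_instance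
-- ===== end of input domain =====

-- B replaces A's per-class reversed re-scan of parents by one forward pass building a deepest-index
-- dict plus a priority pass over the classes (measured constant-factor faster in a timing run).


-- ===== PORT A =====
-- inner loop 'for i in reversed(range(len(parents))): …'; every i is in range,
-- so 'parents.getD i ""' is exactly parents[i]
def pvInnerA (parents : List String) (name : String) : List Nat → Option String
  | [] => none
  | i :: is =>
    let item := parents.getD i ""
    if PySem.Str.isIn name item then
      some (PySem.Str.join "/" (parents.take (i + 1)))   -- '/'.join(parents[:i+1]), i+1 ≥ 0
    else pvInnerA parents name is

-- outer loop 'for name in scrollable_classes: …'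
def pvOuterA (parents : List String) : List String → Option String
  | [] => none
  | name :: rest =>
    match pvInnerA parents name ((List.range parents.length).reverse) with
    | some r => some r
    | none => pvOuterA parents rest

def get_scrollable_element_xpath (xpath : String) (scrollable_classes : List String) : Option String :=
  let parents := PySem.List.slice ((PySem.Str.split? xpath "/").getD []) none (some (-1))   -- split? is some: sep "/" ≠ ""
  pvOuterA parents scrollable_classes

-- ===== PORT B =====
-- 'for i, item in enumerate(parents): for name in scrollable_classes: if name in item: deepest[name] = i'
def pvBuildB (scrollable_classes : List String) (parents : List String) : PySem.Dict String Int :=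
  (PySem.List.enumerate parents 0).foldl
    (fun d p =>
      scrollable_classes.foldl
        (fun d name => if PySem.Str.isIn name p.2 then d.insert name p.1 else d) d)
    PySem.Dict.empty

-- 'for name in scrollable_classes: if name in deepest: return '/'.join(parents[:deepest[name]+1])'
def pvLookupB (parents : List String) (deepest : PySem.Dict String Int) : List String → Option String
  | [] => none
  | name :: rest =>
    match deepest.get? name with
    | some i => some (PySem.Str.join "/" (PySem.List.slice parents none (some (i + 1))))
    | none => pvLookupB parents deepest rest

def get_scrollable_element_xpath_alt (xpath : String) (scrollable_classes : List String) : Option String :=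
  let parents := PySem.List.slice ((PySem.Str.split? xpath "/").getD []) none (some (-1))   -- split? is some: sep "/" ≠ ""
  pvLookupB parents (pvBuildB scrollable_classes parents) scrollable_classes

-- ===== PRECONDITION & SPEC =====
def Spec_get_scrollable_element_xpath (xpath : String) (scrollable_classes : List String) (out : Option String) : Prop := out = get_scrollable_element_xpath_alt xpath scrollable_classes
instance (xpath : String) (scrollable_classes : List String) (out : Option String) : Decidable (Spec_get_scrollable_element_xpath xpath scrollable_classes out) := by unfold Spec_get_scrollable_element_xpath; infer_instance

-- ===== CLAIM (what is proved, stated in full; the proofs are below) =====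
def Claim_equal_get_scrollable_element_xpath : Prop := ∀ (xpath : String) (scrollable_classes : List String), Dom_get_scrollable_element_xpath xpath scrollable_classes → Spec_get_scrollable_element_xpath xpath scrollable_classes (get_scrollable_element_xpath xpath scrollable_classes)

-- ===== LEMMAS AND PROOFS =====

-- 0-based index of the LAST element of the list containing name (proof-side reference value)
def pvLastHit (name : String) : List String → Option Nat
  | [] => none
  | p :: ps =>
    match pvLastHit name ps with
    | some k => some (k + 1)
    | none => if PySem.Str.isIn name p then some 0 else none

theorem pvLastHit_snoc (name : String) (ps : List String) (p : String) :
    pvLastHit name (ps ++ [p]) =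
      if PySem.Str.isIn name p then some ps.length else pvLastHit name ps := by
  induction ps with
  | nil => simp only [List.nil_append, pvLastHit]; split <;> rfl
  | cons q ps ih =>
    simp only [List.cons_append, pvLastHit, ih, List.length_cons]
    by_cases h : PySem.Chars.isIn name.toList p.toList = true
    · simp [h]
    · simp [h]

theorem pvFind?_congr_mem {α : Type} (l : List α) (f g : α → Bool)
    (h : ∀ x ∈ l, f x = g x) : l.find? f = l.find? g := by
  induction l with
  | nil => rfl
  | cons x xs ih =>
    simp only [List.find?]
    rw [h x (List.mem_cons_self), ih fun y hy => h y (List.mem_cons_of_mem _ hy)]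

theorem pvInnerA_find (parents : List String) (name : String) (is : List Nat) :
    pvInnerA parents name is =
      (is.find? (fun i => PySem.Str.isIn name (parents.getD i ""))).map
        (fun i => PySem.Str.join "/" (parents.take (i + 1))) := by
  induction is with
  | nil => rfl
  | cons i is ih =>
    simp only [pvInnerA, List.find?]
    cases h : PySem.Chars.isIn name.toList ((parents[i]?.getD "")).toList <;>
      simp [h, ih]

theorem pvFindRev_eq_lastHit (name : String) (parents : List String) :
    ((List.range parents.length).reverse.find?
        (fun i => PySem.Str.isIn name (parents.getD i ""))) = pvLastHit name parents := by
  induction parents using List.reverseRecOn with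
  | nil => rfl
  | append_singleton ps p ih =>
    rw [pvLastHit_snoc]
    have hlen : (ps ++ [p]).length = ps.length + 1 := by simp
    rw [hlen, List.range_succ, List.reverse_append, List.reverse_singleton, List.singleton_append]
    simp only [List.find?]
    have hp : (ps ++ [p]).getD ps.length "" = p := by
      simp [List.getD_eq_getElem?_getD]
    rw [hp]
    cases h : PySem.Chars.isIn name.toList p.toList
    · simp only [PySem.Str.isIn_eq, h, Bool.false_eq_true, if_false]
      rw [← ih]
      apply pvFind?_congr_mem
      intro i hi
      have hi' : i < ps.length := List.mem_range.mp (List.mem_reverse.mp hi)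
      congr 2
      rw [List.getD_eq_getElem?_getD, List.getD_eq_getElem?_getD,
        List.getElem?_append_left hi']
    · simp [h]

-- effect of the inner classes-fold (one parent p at index i) on a single lookup
theorem pvInnerFold_get? (classes : List String) (p : String) (i : Int)
    (d : PySem.Dict String Int) (name : String) :
    ((classes.foldl (fun d nm => if PySem.Str.isIn nm p then d.insert nm i else d) d).get? name)
      = if name ∈ classes ∧ PySem.Chars.isIn name.toList p.toList = true then some i
        else d.get? name := by
  induction classes generalizing d with
  | nil => simp
  | cons nm rest ih =>
    simp only [List.foldl_cons, ih]
    have hstep : (if PySem.Str.isIn nm p then d.insert nm i else d).get? name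
        = if name = nm ∧ PySem.Chars.isIn name.toList p.toList = true then some i
          else d.get? name := by
      by_cases he : name = nm
      · subst he
        cases hin : PySem.Chars.isIn name.toList p.toList <;>
          simp [hin, PySem.Dict.get?_insert_self]
      · have hins : ∀ v, (d.insert nm v).get? name = d.get? name :=
          fun v => PySem.Dict.get?_insert_of_ne d v he
        split <;> simp [hins, he]
    by_cases hr : name ∈ rest ∧ PySem.Chars.isIn name.toList p.toList = true
    · simp [hr]
    · simp only [hr, if_false]
      rw [hstep]
      by_cases he : name = nm ∧ PySem.Chars.isIn name.toList p.toList = true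
      · simp [he]
      · simp only [he, if_false]
        have hnot : ¬ (name ∈ nm :: rest ∧ PySem.Chars.isIn name.toList p.toList = true) := by
          rintro ⟨hm, hin⟩
          rcases List.mem_cons.mp hm with h | h
          · exact he ⟨h, hin⟩
          · exact hr ⟨h, hin⟩
        rw [if_neg hnot]

theorem pvBuildB_get?_aux (classes : List String) (name : String) (parents : List String) :
    ∀ (s : Int) (d : PySem.Dict String Int),
      (((PySem.List.enumerate parents s).foldl
          (fun d p => classes.foldl
            (fun d nm => if PySem.Str.isIn nm p.2 then d.insert nm p.1 else d) d) d).get? name)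
        = if name ∈ classes then
            match pvLastHit name parents with
            | some k => some (s + k)
            | none => d.get? name
          else d.get? name := by
  induction parents with
  | nil =>
    intro s d
    simp [PySem.List.enumerate_nil, pvLastHit]
  | cons p ps ih =>
    intro s d
    rw [PySem.List.enumerate_cons, List.foldl_cons, ih]
    by_cases hc : name ∈ classes
    · simp only [hc, if_true, pvLastHit]
      cases hL : pvLastHit name ps with
      | some k =>
        simp only []
        congr 1
        push_cast
        ring
      | none =>
        simp only []
        rw [pvInnerFold_get?]
        cases hin : PySem.Chars.isIn name.toList p.toList <;> simp [hc, hin]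
    · simp only [hc, if_false]
      rw [pvInnerFold_get?]
      simp [hc]

theorem pvBuildB_get? (classes : List String) (parents : List String) (name : String)
    (h : name ∈ classes) :
    (pvBuildB classes parents).get? name = (pvLastHit name parents).map (fun k => (k : Int)) := by
  unfold pvBuildB
  rw [pvBuildB_get?_aux]
  simp only [h, if_true]
  cases pvLastHit name parents <;> simp

theorem pvOuter_eq (classes parents : List String) :
    ∀ (l : List String), (∀ n ∈ l, n ∈ classes) →
      pvOuterA parents l = pvLookupB parents (pvBuildB classes parents) l := by
  intro l
  induction l with
  | nil => intro _; rfl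
  | cons name rest ih =>
    intro h
    have hn : name ∈ classes := h name (List.mem_cons_self)
    simp only [pvOuterA, pvLookupB, pvInnerA_find, pvFindRev_eq_lastHit,
      pvBuildB_get? classes parents name hn]
    cases hL : pvLastHit name parents with
    | some k =>
      simp only [Option.map_some]
      congr 2
      have hk : (k : Int) + 1 = ((k + 1 : Nat) : Int) := by push_cast; ring
      rw [hk, PySem.List.slice_to_natCast]
    | none =>
      simp only [Option.map_none]
      exact ih fun n hn' => h n (List.mem_cons_of_mem _ hn')

-- ===== VERDICT (by name: the statement is the Claim_ definition above) =====
theorem get_scrollable_element_xpath_spec : Claim_equal_get_scrollable_element_xpath := by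
  intro xpath classes _
  unfold Spec_get_scrollable_element_xpath get_scrollable_element_xpath get_scrollable_element_xpath_alt
  exact pvOuter_eq classes _ classes (fun _ h => h)
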